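-- pv_equiv track=rewrite | github.com/VynoDePal/Collegue | collegue/tools/impact_analysis/engine.py | build_analysis_summary
-- ===== SOURCE A (Python) =====
-- from typing import List, Dict, Any, Optional, Set, Tuple
--
-- def build_analysis_summary(
--
--     change_intent: str,
--     impacted_files: List[Dict[str, str]],
--     risk_notes: List[Dict[str, str]]
-- ) -> str:
--     """Construit le résumé de l'analyse."""
--     parts = [f"Analyse d'impact pour: {change_intent}"]
--
--     parts.append(f"\nFichiers impactés: {len(impacted_files)}")
--
--     direct = len([f for f in impacted_files if f.get("impact_type") == "direct"])
--     indirect = len([f for f in impacted_files if f.get("impact_type") == "indirect"])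
--     tests = len([f for f in impacted_files if f.get("impact_type") == "test"])
--
--     if direct > 0:
--         parts.append(f"  - Directs: {direct}")
--     if indirect > 0:
--         parts.append(f"  - Indirects: {indirect}")
--     if tests > 0:
--         parts.append(f"  - Tests: {tests}")
--
--     if risk_notes:
--         parts.append(f"\nRisques identifiés: {len(risk_notes)}")
--         for risk in risk_notes:
--             parts.append(f"  - [{risk['severity'].upper()}] {risk['note']}")
--
--     return "\n".join(parts)
-- ===== SOURCE B (Python) =====
-- def build_analysis_summary(change_intent, impacted_files, risk_notes):
--     """One-pass tally with three counters; builds the result by direct string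
--     concatenation (no intermediate parts list, no join)."""
--     d = i = t = 0
--     for f in impacted_files:
--         k = f.get("impact_type")
--         if k == "direct":
--             d += 1
--         elif k == "indirect":
--             i += 1
--         elif k == "test":
--             t += 1
--     out = f"Analyse d'impact pour: {change_intent}\n\nFichiers impactés: {len(impacted_files)}"
--     if d > 0:
--         out += f"\n  - Directs: {d}"
--     if i > 0:
--         out += f"\n  - Indirects: {i}"
--     if t > 0:
--         out += f"\n  - Tests: {t}"
--     if risk_notes:
--         out += f"\n\nRisques identifiés: {len(risk_notes)}"
--         for r in risk_notes:
--             out += f"\n  - [{r['severity'].upper()}] {r['note']}"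
--     return out
-- ===== Notes on version B (the rewrite author's own statement) =====
-- stated objective: alternative
-- what changed: B replaces A's list-of-parts + '\n'.join construction and three filtering passes with a single tally loop keeping three counters and a direct string accumulator that appends each line (with its separator) as it goes.
import Mathlib
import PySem

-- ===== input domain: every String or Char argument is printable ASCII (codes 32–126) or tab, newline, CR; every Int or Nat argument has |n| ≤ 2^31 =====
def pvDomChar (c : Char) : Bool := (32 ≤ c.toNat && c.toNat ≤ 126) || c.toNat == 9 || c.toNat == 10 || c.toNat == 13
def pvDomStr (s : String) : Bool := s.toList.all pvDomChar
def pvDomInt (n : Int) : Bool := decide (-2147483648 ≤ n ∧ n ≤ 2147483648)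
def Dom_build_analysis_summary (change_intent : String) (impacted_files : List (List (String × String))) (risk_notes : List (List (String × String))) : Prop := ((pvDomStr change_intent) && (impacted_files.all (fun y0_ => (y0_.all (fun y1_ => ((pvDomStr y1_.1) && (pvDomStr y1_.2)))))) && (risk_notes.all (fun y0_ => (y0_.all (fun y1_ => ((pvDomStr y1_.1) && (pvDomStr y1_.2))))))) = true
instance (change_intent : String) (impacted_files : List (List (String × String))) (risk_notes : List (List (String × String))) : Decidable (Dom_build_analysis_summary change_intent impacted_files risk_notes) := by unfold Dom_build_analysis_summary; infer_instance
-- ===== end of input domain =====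

-- B replaces the parts-list + join construction and A's three filtering passes by a single
-- three-counter tally pass and an incremental string accumulator (objective: alternative, same cost).

-- ===== PORT A =====
def build_analysis_summary (change_intent : String) (impacted_files : List (List (String × String))) (risk_notes : List (List (String × String))) : String :=
  let parts : List String := ["Analyse d'impact pour: " ++ change_intent]
  let parts := parts ++ ["\nFichiers impactés: " ++ PySem.Int.toStr impacted_files.length]
  let direct := (impacted_files.filter (fun f => (PySem.Dict.mk f).get? "impact_type" == some "direct")).length
  let indirect := (impacted_files.filter (fun f => (PySem.Dict.mk f).get? "impact_type" == some "indirect")).length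
  let tests := (impacted_files.filter (fun f => (PySem.Dict.mk f).get? "impact_type" == some "test")).length
  let parts := if 0 < direct then parts ++ ["  - Directs: " ++ PySem.Int.toStr direct] else parts
  let parts := if 0 < indirect then parts ++ ["  - Indirects: " ++ PySem.Int.toStr indirect] else parts
  let parts := if 0 < tests then parts ++ ["  - Tests: " ++ PySem.Int.toStr tests] else parts
  let parts := if risk_notes.isEmpty then parts else
    let parts := parts ++ ["\nRisques identifiés: " ++ PySem.Int.toStr risk_notes.length]
    risk_notes.foldl (fun acc risk =>
      acc ++ ["  - [" ++ PySem.Str.upper ((PySem.Dict.mk risk).getD "severity" "") ++ "] " ++ (PySem.Dict.mk risk).getD "note" ""]) parts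
  PySem.Str.join "\n" parts

-- ===== PORT B =====
def build_analysis_summary_alt (change_intent : String) (impacted_files : List (List (String × String))) (risk_notes : List (List (String × String))) : String :=
  -- one tally pass: (d, i, t) counters, if/elif/elif as nested ifs
  let c : Int × Int × Int := impacted_files.foldl (fun s f =>
      let k := (PySem.Dict.mk f).get? "impact_type"
      if k == some "direct" then (s.1 + 1, s.2.1, s.2.2)
      else if k == some "indirect" then (s.1, s.2.1 + 1, s.2.2)
      else if k == some "test" then (s.1, s.2.1, s.2.2 + 1)
      else s) ((0 : Int), (0 : Int), (0 : Int))
  let out := "Analyse d'impact pour: " ++ change_intent ++ "\n\nFichiers impactés: " ++ PySem.Int.toStr impacted_files.length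
  let out := if 0 < c.1 then out ++ "\n  - Directs: " ++ PySem.Int.toStr c.1 else out
  let out := if 0 < c.2.1 then out ++ "\n  - Indirects: " ++ PySem.Int.toStr c.2.1 else out
  let out := if 0 < c.2.2 then out ++ "\n  - Tests: " ++ PySem.Int.toStr c.2.2 else out
  if risk_notes.isEmpty then out else
    risk_notes.foldl (fun s r =>
        s ++ "\n  - [" ++ PySem.Str.upper ((PySem.Dict.mk r).getD "severity" "") ++ "] " ++ (PySem.Dict.mk r).getD "note" "")
      (out ++ "\n\nRisques identifiés: " ++ PySem.Int.toStr risk_notes.length)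

-- ===== PRECONDITION & SPEC =====
-- Pre_ excludes exactly the inputs on which A raises KeyError: a risk note lacking a "severity" or "note" key.
def Pre_build_analysis_summary (change_intent : String) (impacted_files : List (List (String × String))) (risk_notes : List (List (String × String))) : Prop :=
  ∀ r ∈ risk_notes, (PySem.Dict.mk r).contains "severity" = true ∧ (PySem.Dict.mk r).contains "note" = true
instance (change_intent : String) (impacted_files : List (List (String × String))) (risk_notes : List (List (String × String))) : Decidable (Pre_build_analysis_summary change_intent impacted_files risk_notes) := by unfold Pre_build_analysis_summary; infer_instance

def pvWitness_build_analysis_summary : String × (List (List (String × String))) × (List (List (String × String))) :=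
  ("add cache", [[("impact_type", "direct")], [("impact_type", "test")]], [[("severity", "high"), ("note", "core module")]])

def Spec_build_analysis_summary (change_intent : String) (impacted_files : List (List (String × String))) (risk_notes : List (List (String × String))) (out : String) : Prop := out = build_analysis_summary_alt change_intent impacted_files risk_notes
instance (change_intent : String) (impacted_files : List (List (String × String))) (risk_notes : List (List (String × String))) (out : String) : Decidable (Spec_build_analysis_summary change_intent impacted_files risk_notes out) := by unfold Spec_build_analysis_summary; infer_instance

-- ===== CLAIM (what is proved, stated in full; the proofs are below) =====
def Claim_equal_build_analysis_summary : Prop := ∀ (change_intent : String) (impacted_files : List (List (String × String))) (risk_notes : List (List (String × String))), Dom_build_analysis_summary change_intent impacted_files risk_notes → Pre_build_analysis_summary change_intent impacted_files risk_notes → Spec_build_analysis_summary change_intent impacted_files risk_notes (build_analysis_summary change_intent impacted_files risk_notes)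

-- ===== LEMMAS AND PROOFS =====

-- B's single tally pass equals A's three filter-lengths (branches of the elif chain are exclusive).
theorem tally_eq (l : List (List (String × String))) (a b c : Int) :
    l.foldl (fun s f =>
      let k := (PySem.Dict.mk f).get? "impact_type"
      if k == some "direct" then (s.1 + 1, s.2.1, s.2.2)
      else if k == some "indirect" then (s.1, s.2.1 + 1, s.2.2)
      else if k == some "test" then (s.1, s.2.1, s.2.2 + 1)
      else s) (a, b, c)
    = (a + ((l.filter (fun f => (PySem.Dict.mk f).get? "impact_type" == some "direct")).length : Int),
       b + ((l.filter (fun f => (PySem.Dict.mk f).get? "impact_type" == some "indirect")).length : Int),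
       c + ((l.filter (fun f => (PySem.Dict.mk f).get? "impact_type" == some "test")).length : Int)) := by
  induction l generalizing a b c with
  | nil => simp
  | cons x t ih =>
    simp only [List.foldl_cons, List.filter_cons]
    by_cases h1 : ((PySem.Dict.mk x).get? "impact_type" == some "direct") = true
    · have h2 : ((PySem.Dict.mk x).get? "impact_type" == some "indirect") = false := by
        simp_all
      have h3 : ((PySem.Dict.mk x).get? "impact_type" == some "test") = false := by
        simp_all
      rw [if_pos h1, if_pos h1, if_neg (by simp [h2]), if_neg (by simp [h3]), ih]
      simp [Prod.ext_iff]; omega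
    · by_cases h2 : ((PySem.Dict.mk x).get? "impact_type" == some "indirect") = true
      · have h3 : ((PySem.Dict.mk x).get? "impact_type" == some "test") = false := by
          simp_all
        rw [if_neg (by simp [h1]), if_pos h2, if_neg (by simp_all), if_pos h2,
            if_neg (by simp [h3]), ih]
        simp [Prod.ext_iff]; omega
      · by_cases h3 : ((PySem.Dict.mk x).get? "impact_type" == some "test") = true
        · rw [if_neg (by simp_all), if_neg (by simp_all), if_pos h3,
              if_neg (by simp_all), if_neg (by simp_all), if_pos h3, ih]
          simp [Prod.ext_iff]; omega
        · rw [if_neg (by simp_all), if_neg (by simp_all), if_neg (by simp_all),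
              if_neg (by simp_all), if_neg (by simp_all), if_neg (by simp_all), ih]

-- join "\n" of a nonempty list, flattened form.
theorem join_newline_cons (x : List Char) (ys : List (List Char)) :
    PySem.Chars.join ['\n'] (x :: ys) = x ++ (ys.map (fun y => '\n' :: y)).flatten := by
  induction ys generalizing x with
  | nil => simp [PySem.Chars.join_singleton]
  | cons y t ih => simp [PySem.Chars.join_cons_cons, ih]

-- toList of B's string-accumulating risk loop.
theorem strfold_toList (l : List (List (String × String))) (base : String) :
    (l.foldl (fun s r =>
        s ++ "\n  - [" ++ PySem.Str.upper ((PySem.Dict.mk r).getD "severity" "") ++ "] " ++ (PySem.Dict.mk r).getD "note" "") base).toList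
      = base.toList ++ (l.map (fun r =>
          ("\n  - [" ++ PySem.Str.upper ((PySem.Dict.mk r).getD "severity" "") ++ "] " ++ (PySem.Dict.mk r).getD "note" "").toList)).flatten := by
  induction l generalizing base with
  | nil => simp
  | cons x t ih => simp [List.foldl_cons, ih]

-- ===== VERDICT (by name: the statement is the Claim_ definition above) =====
theorem build_analysis_summary_spec : Claim_equal_build_analysis_summary := by
  intro ci files risks _ _
  unfold Spec_build_analysis_summary build_analysis_summary build_analysis_summary_alt
  rw [tally_eq]
  simp only [zero_add, Int.natCast_pos, PySem.List.foldl_append_singleton_eq_map]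
  split_ifs <;>
    (apply String.toList_inj.mp;
     simp [PySem.Str.join, strfold_toList, join_newline_cons, List.map_map, Function.comp_def])
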